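-- pv_equiv track=rewrite | github.com/juanIgnacioMatilla/aisystems | TP2/src/hyperparams/crossover/anular_crossover.py | perform_crossover
-- ===== SOURCE A (Python) =====
-- from typing import Tuple, Dict, List
--
-- def perform_crossover(chromosome1: Tuple[int, ...], chromosome2: Tuple[int, ...], start_point: int, segment_length: int) -> Tuple[Tuple[int, ...], Tuple[int, ...]]:
--     """Perform the crossover operation."""
--     num_attributes = len(chromosome1)
--     offspring_values1 = list(chromosome1)
--     offspring_values2 = list(chromosome2)
--
--     for i in range(segment_length):
--         index = (start_point + i) % num_attributes
--         offspring_values1[index], offspring_values2[index] = offspring_values2[index], offspring_values1[index]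
--
--     return tuple(offspring_values1), tuple(offspring_values2)
-- ===== SOURCE B (Python) =====
-- def perform_crossover(chromosome1, chromosome2, start_point, segment_length):
--     """Perform the crossover operation (parity/remainder form: one pass over positions)."""
--     num_attributes = len(chromosome1)
--     offspring_values1 = list(chromosome1)
--     offspring_values2 = list(chromosome2)
--     if segment_length > 0:
--         full, rem = divmod(segment_length, num_attributes)
--         for j in range(num_attributes):
--             if (full % 2 == 1) != (((j - start_point) % num_attributes) < rem):
--                 offspring_values1[j], offspring_values2[j] = offspring_values2[j], offspring_values1[j]
--     return tuple(offspring_values1), tuple(offspring_values2)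
-- ===== Notes on version B (the rewrite author's own statement) =====
-- stated objective: alternative
-- what changed: A swaps entries once per loop iteration, segment_length times (wrapping the chromosome repeatedly); B computes full = segment_length // n and rem = segment_length % n once and makes a single pass over the n positions, swapping position j exactly when (full is odd) XOR ((j - start_point) % n < rem), i.e. when A's loop hits j an odd number of times.
import Mathlib
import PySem

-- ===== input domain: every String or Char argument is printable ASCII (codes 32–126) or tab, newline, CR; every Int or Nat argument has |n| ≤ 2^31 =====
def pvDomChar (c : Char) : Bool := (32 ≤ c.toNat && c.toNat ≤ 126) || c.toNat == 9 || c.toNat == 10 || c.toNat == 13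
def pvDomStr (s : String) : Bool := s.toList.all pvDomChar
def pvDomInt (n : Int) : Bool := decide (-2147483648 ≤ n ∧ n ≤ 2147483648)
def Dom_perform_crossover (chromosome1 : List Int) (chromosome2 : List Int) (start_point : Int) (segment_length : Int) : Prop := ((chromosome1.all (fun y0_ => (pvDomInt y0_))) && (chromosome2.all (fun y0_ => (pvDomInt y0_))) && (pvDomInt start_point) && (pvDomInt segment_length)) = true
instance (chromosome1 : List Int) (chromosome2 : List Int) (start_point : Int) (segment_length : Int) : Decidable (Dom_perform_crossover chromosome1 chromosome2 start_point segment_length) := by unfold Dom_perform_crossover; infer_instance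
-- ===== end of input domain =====

-- B replaces A's segment_length-step swap loop (which may wrap the chromosome many times)
-- by one pass over the num_attributes positions, swapping position j iff the number of loop
-- iterations that hit j — full wraps plus the remainder arc — is odd. Objective: alternative
-- (a genuinely different decomposition of the same crossover).

-- ===== PORT A =====
-- loop body of A: swap offspring1[index] and offspring2[index] at index = (start_point + i) % n.
-- pyGetD/pySetD are exact under Pre_ (every touched index is in range for both lists there).
def pvStepA (n : Int) (sp : Int) (st : List Int × List Int) (i : Int) : List Int × List Int :=
  let index := PySem.Int.mod (sp + i) n
  (PySem.List.pySetD st.1 index (PySem.List.pyGetD st.2 index 0),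
   PySem.List.pySetD st.2 index (PySem.List.pyGetD st.1 index 0))

def perform_crossover (chromosome1 : List Int) (chromosome2 : List Int) (start_point : Int) (segment_length : Int) : List Int × List Int :=
  (PySem.List.pyRange 0 segment_length 1).foldl
    (pvStepA (chromosome1.length : Int) start_point) (chromosome1, chromosome2)

-- ===== PORT B =====
-- swap test of B: position j is swapped iff (full is odd) XOR ((j - start_point) % n < rem)
def pvSwB (n sp full rem : Int) (j : Nat) : Bool :=
  (decide (PySem.Int.mod full 2 = 1)) != (decide (PySem.Int.mod ((j : Int) - sp) n < rem))

-- loop body of B: conditionally swap the two entries at position j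
def pvStepB (n sp full rem : Int) (st : List Int × List Int) (j : Nat) : List Int × List Int :=
  if pvSwB n sp full rem j then
    (PySem.List.pySetD st.1 (j : Int) (PySem.List.pyGetD st.2 (j : Int) 0),
     PySem.List.pySetD st.2 (j : Int) (PySem.List.pyGetD st.1 (j : Int) 0))
  else st

def perform_crossover_alt (chromosome1 : List Int) (chromosome2 : List Int) (start_point : Int) (segment_length : Int) : List Int × List Int :=
  let n : Int := (chromosome1.length : Int)
  if segment_length > 0 then
    let full := PySem.Int.floordiv segment_length n
    let rem := PySem.Int.mod segment_length n
    (List.range chromosome1.length).foldl (pvStepB n start_point full rem) (chromosome1, chromosome2)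
  else (chromosome1, chromosome2)

-- ===== PRECONDITION & SPEC =====
-- Pre_ excludes exactly the inputs where the Python A raises: segment_length > 0 with an empty
-- chromosome1 (ZeroDivisionError from % 0), or a touched index (sp + j) % n, j < min(seg, n),
-- beyond the end of chromosome2 (IndexError).
def Pre_perform_crossover (chromosome1 : List Int) (chromosome2 : List Int) (start_point : Int) (segment_length : Int) : Prop :=
  segment_length ≤ 0 ∨
    (0 < chromosome1.length ∧
      ∀ j < min segment_length.toNat chromosome1.length,
        PySem.Int.mod (start_point + (j : Int)) (chromosome1.length : Int) < (chromosome2.length : Int))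
instance (chromosome1 : List Int) (chromosome2 : List Int) (start_point : Int) (segment_length : Int) : Decidable (Pre_perform_crossover chromosome1 chromosome2 start_point segment_length) := by unfold Pre_perform_crossover; infer_instance

def pvWitness_perform_crossover : List Int × List Int × Int × Int := ([1, 2, 3], [4, 5, 6], 1, 5)

def Spec_perform_crossover (chromosome1 : List Int) (chromosome2 : List Int) (start_point : Int) (segment_length : Int) (out : List Int × List Int) : Prop := out = perform_crossover_alt chromosome1 chromosome2 start_point segment_length
instance (chromosome1 : List Int) (chromosome2 : List Int) (start_point : Int) (segment_length : Int) (out : List Int × List Int) : Decidable (Spec_perform_crossover chromosome1 chromosome2 start_point segment_length out) := by unfold Spec_perform_crossover; infer_instance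

-- ===== CLAIM (what is proved, stated in full; the proofs are below) =====
def Claim_equal_perform_crossover : Prop := ∀ (chromosome1 : List Int) (chromosome2 : List Int) (start_point : Int) (segment_length : Int), Dom_perform_crossover chromosome1 chromosome2 start_point segment_length → Pre_perform_crossover chromosome1 chromosome2 start_point segment_length → Spec_perform_crossover chromosome1 chromosome2 start_point segment_length (perform_crossover chromosome1 chromosome2 start_point segment_length)

-- ===== LEMMAS AND PROOFS =====

-- how many of A's loop iterations i < m hit position k
def pvCnt (sp : Int) (n : Nat) (m : Nat) (k : Nat) : Nat :=
  (List.range m).countP (fun (i : Nat) => PySem.Int.mod (sp + (i : Int)) (n : Int) == (k : Int))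

-- a list is the map of its getD over its index range
theorem pv_map_getD_range {α : Type} (l : List α) (d : α) :
    (List.range l.length).map (fun k => l.getD k d) = l := by
  apply List.ext_getElem
  · simp
  · intro i h1 h2
    simp [List.getElem?_eq_getElem h2]

-- set on a map over range rewrites the mapped function pointwise
theorem pv_set_map_range {α : Type} (L : Nat) (f : Nat → α) (K : Nat) (v : α) :
    ((List.range L).map f).set K v
      = (List.range L).map (fun k => if k = K then v else f k) := by
  apply List.ext_getElem
  · simp
  · intro i h1 h2
    simp only [List.getElem_set, List.getElem_map, List.getElem_range]
    by_cases hiK : i = K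
    · simp [hiK]
    · simp only [if_neg hiK]
      rw [if_neg (fun h => hiK h.symm)]

theorem pv_emod_eq_iff (n a b : Int) (_hn : 0 < n) (hb0 : 0 ≤ b) (hbn : b < n) :
    a % n = b ↔ (n ∣ a - b) := by
  have h1 : a % n = b % n ↔ (a - b) % n = 0 := Int.emod_eq_emod_iff_emod_sub_eq_zero
  rw [Int.emod_eq_of_lt hb0 hbn] at h1
  rw [h1, PySem.Int.emod_eq_zero_iff_dvd]

-- A's hit test at iteration i as a congruence on residues
theorem pv_hit_iff (sp : Int) (n : Nat) (hn : 0 < n) (i k : Nat) (hk : k < n) :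
    PySem.Int.mod (sp + (i : Int)) (n : Int) = (k : Int)
      ↔ ((k : Int) - sp) % (n : Int) = ((i % n : Nat) : Int) := by
  have hnI : (0 : Int) < (n : Int) := by exact_mod_cast hn
  rw [PySem.Int.mod_eq_emod_of_pos hnI]
  rw [pv_emod_eq_iff _ _ _ hnI (by positivity) (by exact_mod_cast hk)]
  rw [pv_emod_eq_iff _ _ _ hnI (by positivity) (by
        have := Nat.mod_lt i hn; exact_mod_cast this)]
  have hi : (i : Int) = (n : Int) * ((i / n : Nat) : Int) + ((i % n : Nat) : Int) := by
    exact_mod_cast (Nat.div_add_mod i n).symm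
  constructor
  · intro ⟨c, hc⟩
    refine ⟨((i / n : Nat) : Int) - c, ?_⟩
    rw [Int.mul_sub]; omega
  · intro ⟨c, hc⟩
    refine ⟨((i / n : Nat) : Int) - c, ?_⟩
    rw [Int.mul_sub]; omega

-- count step
theorem pvCnt_succ (sp : Int) (n : Nat) (m k : Nat) :
    pvCnt sp n (m + 1) k
      = pvCnt sp n m k
        + (if PySem.Int.mod (sp + (m : Int)) (n : Int) = (k : Int) then 1 else 0) := by
  unfold pvCnt
  rw [List.range_succ, List.countP_append]
  simp [List.countP_cons]

-- positions at or beyond n are never hit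
theorem pvCnt_eq_zero (sp : Int) (n : Nat) (hn : 0 < n) (m k : Nat) (hk : n ≤ k) :
    pvCnt sp n m k = 0 := by
  unfold pvCnt
  rw [List.countP_eq_zero]
  intro i _
  have h := PySem.Int.mod_lt (sp + (i : Int)) (b := (n : Int)) (by exact_mod_cast hn)
  simp only [beq_iff_eq]
  intro hEq
  omega

-- closed form for the hit count: full wraps plus the remainder arc
theorem pvCnt_formula (sp : Int) (n : Nat) (hn : 0 < n) (S k : Nat) (hk : k < n) :
    pvCnt sp n S k
      = S / n + (if ((k : Int) - sp) % (n : Int) < ((S % n : Nat) : Int) then 1 else 0) := by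
  have hnI : (0 : Int) < (n : Int) := by exact_mod_cast hn
  have hr0 : 0 ≤ ((k : Int) - sp) % (n : Int) := Int.emod_nonneg _ (by omega)
  have hrn : ((k : Int) - sp) % (n : Int) < (n : Int) := Int.emod_lt_of_pos _ hnI
  induction S with
  | zero =>
      simp [pvCnt]
      omega
  | succ S ih =>
      rw [pvCnt_succ, ih]
      simp only [pv_hit_iff sp n hn S k hk]
      have hd1 := Nat.div_add_mod S n
      have hxn : S % n < n := Nat.mod_lt S hn
      by_cases hcase : S % n + 1 < n
      · have hS1 : (S + 1) / n = S / n ∧ (S + 1) % n = S % n + 1 :=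
          (Nat.div_mod_unique hn).mpr ⟨by omega, by omega⟩
        split_ifs <;> omega
      · have hmul : n * (S / n + 1) = n * (S / n) + n := by ring
        have hS1 : (S + 1) / n = S / n + 1 ∧ (S + 1) % n = 0 :=
          (Nat.div_mod_unique hn).mpr ⟨by omega, by omega⟩
        split_ifs <;> omega

-- characterization of A's loop after m iterations: entry k holds the original value,
-- crossed over exactly when the hit count of k so far is odd
theorem pv_loopA (c1 c2 : List Int) (sp : Int) (hn : 0 < c1.length) (m : Nat)
    (hIn : ∀ i < m, (PySem.Int.mod (sp + (i : Int)) (c1.length : Int)).toNat < c2.length) :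
    (List.range m).foldl (fun st (i : Nat) => pvStepA (c1.length : Int) sp st (i : Int)) (c1, c2)
      = ((List.range c1.length).map
           (fun k => if pvCnt sp c1.length m k % 2 = 1 then c2.getD k 0 else c1.getD k 0),
         (List.range c2.length).map
           (fun k => if pvCnt sp c1.length m k % 2 = 1 then c1.getD k 0 else c2.getD k 0)) := by
  induction m with
  | zero =>
      simp only [List.range_zero, List.foldl_nil, Prod.mk.injEq]
      constructor <;>
        · refine Eq.symm (Eq.trans (List.map_congr_left ?_) (pv_map_getD_range _ 0))
          intro k _
          simp [pvCnt]
  | succ m ih =>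
      rw [List.range_succ, List.foldl_append, ih (fun i hi => hIn i (by omega))]
      have hnI : (0 : Int) < (c1.length : Int) := by exact_mod_cast hn
      have h0 := PySem.Int.mod_nonneg (sp + (m : Int)) hnI
      have h1 := PySem.Int.mod_lt (sp + (m : Int)) hnI
      have hK2 := hIn m (Nat.lt_succ_self m)
      simp only [List.foldl_cons, List.foldl_nil, pvStepA]
      rw [PySem.List.pyGetD_eq_getElem _ _ h0
            (by simp only [List.length_map, List.length_range]; omega),
          PySem.List.pyGetD_eq_getElem _ _ h0
            (by simp only [List.length_map, List.length_range]; omega),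
          PySem.List.pySetD_of_nonneg _ _ h0, PySem.List.pySetD_of_nonneg _ _ h0,
          pv_set_map_range, pv_set_map_range]
      simp only [List.getElem_map, List.getElem_range, Prod.mk.injEq]
      constructor <;>
        · apply List.map_congr_left
          intro k hk
          rw [List.mem_range] at hk
          have hstep := pvCnt_succ sp c1.length m k
          by_cases hkK : k = (PySem.Int.mod (sp + (m : Int)) (c1.length : Int)).toNat
          · have hhit : PySem.Int.mod (sp + (m : Int)) (c1.length : Int) = (k : Int) := by omega
            rw [if_pos hkK, hstep, if_pos hhit, hkK]
            by_cases hp : pvCnt sp c1.length m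
                ((PySem.Int.mod (sp + (m : Int)) (c1.length : Int)).toNat) % 2 = 1
            · rw [if_pos hp, if_neg (by omega)]
            · rw [if_neg hp, if_pos (by omega)]
          · have hhit : ¬ PySem.Int.mod (sp + (m : Int)) (c1.length : Int) = (k : Int) := by
              intro h; exact hkK (by omega)
            rw [if_neg hkK, hstep, if_neg hhit, Nat.add_zero]

-- characterization of B's loop after t steps: positions below t are crossed over
-- exactly when the swap test holds, positions at or above t are untouched
theorem pv_loopB (c1 c2 : List Int) (sp full rem : Int)
    (hIn : ∀ j, j < c1.length → pvSwB (c1.length : Int) sp full rem j = true → j < c2.length)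
    (t : Nat)(ht : t ≤ c1.length) :
    (List.range t).foldl (pvStepB (c1.length : Int) sp full rem) (c1, c2)
      = ((List.range c1.length).map
           (fun k => if k < t ∧ pvSwB (c1.length : Int) sp full rem k = true
                     then c2.getD k 0 else c1.getD k 0),
         (List.range c2.length).map
           (fun k => if k < t ∧ pvSwB (c1.length : Int) sp full rem k = true
                     then c1.getD k 0 else c2.getD k 0)) := by
  induction t with
  | zero =>
      simp only [List.range_zero, List.foldl_nil, Prod.mk.injEq]
      constructor <;>
        · refine Eq.symm (Eq.trans (List.map_congr_left ?_) (pv_map_getD_range _ 0))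
          intro k _
          simp
  | succ t ih =>
      rw [List.range_succ, List.foldl_append, ih (by omega)]
      simp only [List.foldl_cons, List.foldl_nil, pvStepB]
      by_cases hsw : pvSwB (c1.length : Int) sp full rem t = true
      · rw [if_pos hsw]
        have ht2 : t < c2.length := hIn t (by omega) hsw
        have ht1 : t < c1.length := by omega
        simp only [PySem.List.pySetD_natCast, PySem.List.pyGetD_natCast]
        rw [PySem.List.getD_map_range _ _ _ _ ht2, PySem.List.getD_map_range _ _ _ _ ht1,
            pv_set_map_range, pv_set_map_range]
        simp only [Prod.mk.injEq]
        constructor <;>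
          · apply List.map_congr_left
            intro k hk
            rw [List.mem_range] at hk
            by_cases hkt : k = t
            · subst hkt
              rw [if_pos rfl, if_neg (by omega), if_pos ⟨Nat.lt_succ_self k, hsw⟩]
            · rw [if_neg hkt]
              by_cases hklt : k < t ∧ pvSwB (c1.length : Int) sp full rem k = true
              · rw [if_pos hklt, if_pos ⟨by omega, hklt.2⟩]
              · rw [if_neg hklt, if_neg (by rintro ⟨hlt, hswk⟩; exact hklt ⟨by omega, hswk⟩)]
      · rw [if_neg hsw]
        simp only [Prod.mk.injEq]
        constructor <;>
          · apply List.map_congr_left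
            intro k hk
            rw [List.mem_range] at hk
            by_cases hklt : k < t ∧ pvSwB (c1.length : Int) sp full rem k = true
            · rw [if_pos hklt, if_pos ⟨by omega, hklt.2⟩]
            · rw [if_neg hklt, if_neg (by
                rintro ⟨hlt, hswk⟩
                rcases Nat.lt_succ_iff_lt_or_eq.mp hlt with h | h
                · exact hklt ⟨h, hswk⟩
                · subst h; exact hsw hswk)]

-- dropping full wraps of the loop counter does not change the index
theorem pv_mod_reduce (sp : Int) (n : Nat) (hn : 0 < n) (i : Nat) :
    PySem.Int.mod (sp + (i : Int)) (n : Int)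
      = PySem.Int.mod (sp + ((i % n : Nat) : Int)) (n : Int) := by
  have hnI : (0 : Int) < (n : Int) := by exact_mod_cast hn
  rw [PySem.Int.mod_eq_emod_of_pos hnI, PySem.Int.mod_eq_emod_of_pos hnI]
  have hi : (i : Int) = (n : Int) * ((i / n : Nat) : Int) + ((i % n : Nat) : Int) := by
    exact_mod_cast (Nat.div_add_mod i n).symm
  rw [show sp + (i : Int)
        = sp + ((i % n : Nat) : Int) + ((i / n : Nat) : Int) * (n : Int) by rw [hi]; ring]
  rw [Int.add_mul_emod_self_right]

theorem perform_crossover_spec : Claim_equal_perform_crossover := by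
  intro c1 c2 sp sl _hDom hPre
  unfold Spec_perform_crossover
  by_cases hsl : sl > 0
  case neg =>
    unfold perform_crossover perform_crossover_alt
    rw [PySem.List.pyRange_one_eq_nil (by omega)]
    simp [hsl]
  case pos =>
    rcases hPre with h | ⟨hn, hbound⟩
    · omega
    have hnI : (0 : Int) < (c1.length : Int) := by exact_mod_cast hn
    -- every index A's loop touches is in range for chromosome2
    have hInA : ∀ i < sl.toNat,
        (PySem.Int.mod (sp + (i : Int)) (c1.length : Int)).toNat < c2.length := by
      intro i hi
      have hred := pv_mod_reduce sp c1.length hn i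
      have hb := hbound (i % c1.length)
        (Nat.lt_min.mpr ⟨lt_of_le_of_lt (Nat.mod_le i _) hi, Nat.mod_lt i hn⟩)
      have h0 := PySem.Int.mod_nonneg (sp + ((i % c1.length : Nat) : Int)) hnI
      rw [hred]; omega
    -- B's swap test holds exactly when A's hit count is odd
    have hSw : ∀ k < c1.length,
        (pvSwB (c1.length : Int) sp (PySem.Int.floordiv sl (c1.length : Int))
            (PySem.Int.mod sl (c1.length : Int)) k = true)
          ↔ pvCnt sp c1.length sl.toNat k % 2 = 1 := by
      intro k hk
      have hslS : sl = ((sl.toNat : Nat) : Int) := by omega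
      have hfull : PySem.Int.floordiv sl (c1.length : Int)
          = ((sl.toNat / c1.length : Nat) : Int) := by
        rw [hslS]; exact_mod_cast PySem.Int.floordiv_natCast sl.toNat c1.length
      have hrem : PySem.Int.mod sl (c1.length : Int)
          = ((sl.toNat % c1.length : Nat) : Int) := by
        rw [hslS]; exact_mod_cast PySem.Int.mod_natCast sl.toNat c1.length
      unfold pvSwB
      rw [hfull, hrem, pvCnt_formula sp c1.length hn sl.toNat k hk,
          PySem.Int.mod_eq_emod_of_pos hnI,
          PySem.Int.mod_eq_emod_of_pos (show (0 : Int) < 2 by norm_num)]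
      have hr0 : 0 ≤ ((k : Int) - sp) % (c1.length : Int) := Int.emod_nonneg _ (by omega)
      have hrn : ((k : Int) - sp) % (c1.length : Int) < (c1.length : Int) :=
        Int.emod_lt_of_pos _ hnI
      simp only [bne_iff_ne, ne_eq, decide_eq_decide]
      split_ifs with hQ <;> omega
    -- hence every position B swaps is in range for chromosome2
    have hInB : ∀ j, j < c1.length →
        pvSwB (c1.length : Int) sp (PySem.Int.floordiv sl (c1.length : Int))
          (PySem.Int.mod sl (c1.length : Int)) j = true → j < c2.length := by
      intro j hj hswj
      have hodd := (hSw j hj).mp hswj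
      have hpos : 0 < pvCnt sp c1.length sl.toNat j := by omega
      unfold pvCnt at hpos
      rw [List.countP_pos_iff] at hpos
      obtain ⟨i, hi, hhit⟩ := hpos
      rw [List.mem_range] at hi
      rw [beq_iff_eq] at hhit
      have hA := hInA i hi
      rw [hhit] at hA
      simpa using hA
    unfold perform_crossover perform_crossover_alt
    rw [PySem.List.pyRange_one]
    simp only [Int.sub_zero]
    rw [List.foldl_map]
    simp only [zero_add]
    rw [pv_loopA c1 c2 sp hn sl.toNat hInA]
    simp only [if_pos hsl]
    rw [pv_loopB c1 c2 sp (PySem.Int.floordiv sl (c1.length : Int))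
          (PySem.Int.mod sl (c1.length : Int)) hInB c1.length le_rfl]
    simp only [Prod.mk.injEq]
    constructor
    · apply List.map_congr_left
      intro k hk
      rw [List.mem_range] at hk
      by_cases hp : pvCnt sp c1.length sl.toNat k % 2 = 1
      · rw [if_pos hp, if_pos ⟨hk, (hSw k hk).mpr hp⟩]
      · rw [if_neg hp, if_neg (fun h => hp ((hSw k hk).mp h.2))]
    · apply List.map_congr_left
      intro k hk
      rw [List.mem_range] at hk
      by_cases hkn : k < c1.length
      · by_cases hp : pvCnt sp c1.length sl.toNat k % 2 = 1
        · rw [if_pos hp, if_pos ⟨hkn, (hSw k hkn).mpr hp⟩]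
        · rw [if_neg hp, if_neg (fun h => hp ((hSw k hkn).mp h.2))]
      · rw [if_neg (by rw [pvCnt_eq_zero sp c1.length hn sl.toNat k (by omega)]; omega),
            if_neg (fun h => hkn h.1)]
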